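-- pv_equiv track=rewrite | github.com/owenvickery/cg2at | database/script_files/gen.py | sort_connectivity
-- ===== SOURCE A (Python) =====
-- def sort_connectivity(atom_dict, heavy_bond):
--     cut_group = {}
--     if len(atom_dict) > 1:
--         for group in atom_dict:
--             cut_group[group]={}
--             for frag in atom_dict[group]:
--                 for atom in atom_dict[group][frag]:
--                     if atom in heavy_bond:
--                         for bond in heavy_bond[atom]:
--                             for group_2 in atom_dict:
--                                 if group_2 != group:
--                                     for frag in atom_dict[group_2]:
--                                         if bond in atom_dict[group_2][frag]:
--                                             cut_group[group][atom] = [frag]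
--     return cut_group
-- ===== SOURCE B (Python) =====
-- def sort_connectivity(atom_dict, heavy_bond):
--     if len(atom_dict) <= 1:
--         return {}
--     # index: atom -> ordered list of (group, frag) pairs whose fragment contains it
--     occ_list = [(a, (g, f)) for g in atom_dict for f in atom_dict[g]
--                 for a in dict.fromkeys(atom_dict[g][f])]
--     occ = {}
--     for a, gf in occ_list:
--         occ.setdefault(a, []).append(gf)
--     cut_group = {}
--     for g in atom_dict:
--         cut = {}
--         for f in atom_dict[g]:
--             for a in atom_dict[g][f]:
--                 if a in heavy_bond:
--                     last = None
--                     for b in heavy_bond[a]: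
--                         for g2, f2 in occ.get(b, ()):
--                             if g2 != g:
--                                 last = f2
--                     if last is not None:
--                         cut[a] = [last]
--         cut_group[g] = cut
--     return cut_group
-- ===== Notes on version B (the rewrite author's own statement) =====
-- stated objective: faster
-- what changed: B builds a bond->(group,frag) occurrence index once and answers each atom's bonds by a dictionary lookup plus a last-assignment scan, instead of A's rescan of the entire group/fragment hierarchy for every bond of every atom.
import Mathlib
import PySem

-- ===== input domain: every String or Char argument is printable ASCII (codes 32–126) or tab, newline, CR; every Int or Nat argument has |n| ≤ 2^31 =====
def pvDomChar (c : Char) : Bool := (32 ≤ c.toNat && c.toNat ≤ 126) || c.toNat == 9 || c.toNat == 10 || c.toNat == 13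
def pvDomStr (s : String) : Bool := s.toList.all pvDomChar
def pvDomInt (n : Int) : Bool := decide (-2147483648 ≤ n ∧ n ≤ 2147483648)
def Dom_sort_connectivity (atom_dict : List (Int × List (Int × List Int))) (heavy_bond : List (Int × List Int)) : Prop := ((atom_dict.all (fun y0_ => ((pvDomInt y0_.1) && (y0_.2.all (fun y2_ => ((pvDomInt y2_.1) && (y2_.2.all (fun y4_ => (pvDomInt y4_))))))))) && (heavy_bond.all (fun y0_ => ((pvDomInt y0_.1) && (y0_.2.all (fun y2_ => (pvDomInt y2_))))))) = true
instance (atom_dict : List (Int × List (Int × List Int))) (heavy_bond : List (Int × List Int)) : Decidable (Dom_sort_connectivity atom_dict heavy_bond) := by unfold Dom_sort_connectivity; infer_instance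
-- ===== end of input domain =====

-- B replaces A's per-bond rescan of the whole group/fragment hierarchy by a bond→(group,frag) index built once; equal return values, no mutation involved.

-- first value associated with key k in an association list (= Python dict lookup, unique keys)
def pvLookup {β : Type} (d : List (Int × β)) (k : Int) : Option β :=
  (d.find? (fun p => p.1 == k)).map (·.2)

-- ===== PORT A =====
def sort_connectivity (atom_dict : List (Int × List (Int × List Int))) (heavy_bond : List (Int × List Int)) : List (Int × List (Int × List Int)) :=
  let cut_group : PySem.Dict Int (PySem.Dict Int (List Int)) :=
    if atom_dict.length > 1 then
      atom_dict.foldl (fun cg gp =>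
        let cg := cg.insert gp.1 PySem.Dict.empty
        gp.2.foldl (fun cg fp =>
          fp.2.foldl (fun cg atom =>
            match pvLookup heavy_bond atom with
            | none => cg
            | some bonds =>
              bonds.foldl (fun cg bond =>
                atom_dict.foldl (fun cg gp2 =>
                  if gp2.1 ≠ gp.1 then
                    gp2.2.foldl (fun cg fp2 =>
                      if bond ∈ fp2.2 then
                        cg.modify gp.1 PySem.Dict.empty (fun inner => inner.insert atom [fp2.1])
                      else cg) cg
                  else cg) cg) cg) cg) cg) PySem.Dict.empty
    else PySem.Dict.empty
  cut_group.items.map (fun p => (p.1, p.2.items))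

-- ===== PORT B =====
def sort_connectivity_alt (atom_dict : List (Int × List (Int × List Int))) (heavy_bond : List (Int × List Int)) : List (Int × List (Int × List Int)) :=
  if atom_dict.length ≤ 1 then []
  else
    let occ_list : List (Int × (Int × Int)) :=
      atom_dict.flatMap (fun gp => gp.2.flatMap (fun fp =>
        (PySem.List.dedup fp.2).map (fun a => (a, (gp.1, fp.1)))))
    let occ : PySem.Dict Int (List (Int × Int)) :=
      occ_list.foldl (fun d p => d.modify p.1 [] (fun l => l ++ [p.2])) PySem.Dict.empty
    atom_dict.map (fun gp =>
      (gp.1, (gp.2.foldl (fun cut fp =>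
        fp.2.foldl (fun cut a =>
          match pvLookup heavy_bond a with
          | none => cut
          | some bonds =>
            match bonds.foldl (fun last b =>
                (occ.getD b []).foldl (fun last q => if q.1 ≠ gp.1 then some q.2 else last) last) none with
            | none => cut
            | some f => cut.insert a [f]) cut) PySem.Dict.empty).items))

-- ===== PRECONDITION & SPEC =====
-- Pre_ excludes association lists with duplicate keys at any dict level: such lists do not
-- represent any Python dict input (a Python dict cannot carry duplicate keys), so nothing is
-- claimed about them; every actual dict argument pair is admitted.
def Pre_sort_connectivity (atom_dict : List (Int × List (Int × List Int))) (heavy_bond : List (Int × List Int)) : Prop :=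
  (atom_dict.map (·.1)).Nodup ∧ (∀ p ∈ atom_dict, (p.2.map (·.1)).Nodup) ∧ (heavy_bond.map (·.1)).Nodup
instance (atom_dict : List (Int × List (Int × List Int))) (heavy_bond : List (Int × List Int)) : Decidable (Pre_sort_connectivity atom_dict heavy_bond) := by unfold Pre_sort_connectivity; infer_instance

def pvWitness_sort_connectivity : (List (Int × List (Int × List Int))) × (List (Int × List Int)) :=
  ([(0, [(0, [1])]), (1, [(2, [2])])], [(1, [2])])

def Spec_sort_connectivity (atom_dict : List (Int × List (Int × List Int))) (heavy_bond : List (Int × List Int)) (out : List (Int × List (Int × List Int))) : Prop := out = sort_connectivity_alt atom_dict heavy_bond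
instance (atom_dict : List (Int × List (Int × List Int))) (heavy_bond : List (Int × List Int)) (out : List (Int × List (Int × List Int))) : Decidable (Spec_sort_connectivity atom_dict heavy_bond out) := by unfold Spec_sort_connectivity; infer_instance

-- ===== CLAIM (what is proved, stated in full; the proofs are below) =====
def Claim_equal_sort_connectivity : Prop := ∀ (atom_dict : List (Int × List (Int × List Int))) (heavy_bond : List (Int × List Int)), Dom_sort_connectivity atom_dict heavy_bond → Pre_sort_connectivity atom_dict heavy_bond → Spec_sort_connectivity atom_dict heavy_bond (sort_connectivity atom_dict heavy_bond)

-- ===== LEMMAS AND PROOFS =====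

-- A's inner per-group computation, acting directly on the inner dict
def innerA (ad : List (Int × List (Int × List Int))) (hb : List (Int × List Int)) (g : Int) (frags : List (Int × List Int)) : PySem.Dict Int (List Int) :=
  frags.foldl (fun d fp =>
    fp.2.foldl (fun d atom =>
      match pvLookup hb atom with
      | none => d
      | some bonds =>
        bonds.foldl (fun d bond =>
          ad.foldl (fun d gp2 =>
            if gp2.1 ≠ g then
              gp2.2.foldl (fun d fp2 =>
                if bond ∈ fp2.2 then d.insert atom [fp2.1] else d) d
            else d) d) d) d) PySem.Dict.empty

-- the ordered list of fragment ids A's match loop would assign for one atom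
def msList (ad : List (Int × List (Int × List Int))) (g : Int) (bonds : List Int) : List Int :=
  bonds.flatMap (fun b => ad.flatMap (fun gp2 =>
    if gp2.1 = g then [] else gp2.2.flatMap (fun fp2 => if b ∈ fp2.2 then [fp2.1] else [])))

-- the ordered (group, frag) occurrence list of a bond (what occ stores per key)
def occPairs (ad : List (Int × List (Int × List Int))) (b : Int) : List (Int × Int) :=
  ad.flatMap (fun gp2 => gp2.2.flatMap (fun fp2 => if b ∈ fp2.2 then [(gp2.1, fp2.1)] else []))

theorem insert_modify_self {ν : Type} (d : PySem.Dict Int ν) (k : Int) (v d0 : ν) (f : ν → ν) :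
    (d.insert k v).modify k d0 f = d.insert k (f v) := by
  simp [PySem.Dict.modify, PySem.Dict.getD_insert_self, PySem.Dict.insert_insert_self]

-- the whole per-group body of A only touches key g: it lifts through cg.insert g ·
theorem liftA (ad : List (Int × List (Int × List Int))) (hb : List (Int × List Int))
    (cg : PySem.Dict Int (PySem.Dict Int (List Int))) (g : Int) (d : PySem.Dict Int (List Int))
    (frags : List (Int × List Int)) :
    frags.foldl (fun cg fp =>
      fp.2.foldl (fun cg atom =>
        match pvLookup hb atom with
        | none => cg
        | some bonds =>
          bonds.foldl (fun cg bond =>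
            ad.foldl (fun cg gp2 =>
              if gp2.1 ≠ g then
                gp2.2.foldl (fun cg fp2 =>
                  if bond ∈ fp2.2 then
                    cg.modify g PySem.Dict.empty (fun inner => inner.insert atom [fp2.1])
                  else cg) cg
              else cg) cg) cg) cg) (cg.insert g d)
    = cg.insert g (frags.foldl (fun d fp =>
        fp.2.foldl (fun d atom =>
          match pvLookup hb atom with
          | none => d
          | some bonds =>
            bonds.foldl (fun d bond =>
              ad.foldl (fun d gp2 =>
                if gp2.1 ≠ g then
                  gp2.2.foldl (fun d fp2 =>
                    if bond ∈ fp2.2 then d.insert atom [fp2.1] else d) d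
                else d) d) d) d) d) := by
  apply List.foldl_hom (f := fun d => cg.insert g d)
  intro d fp
  apply List.foldl_hom (f := fun d => cg.insert g d)
  intro d atom
  cases hl : pvLookup hb atom with
  | none => rfl
  | some bonds =>
    apply List.foldl_hom (f := fun d => cg.insert g d)
    intro d bond
    apply List.foldl_hom (f := fun d => cg.insert g d)
    intro d gp2
    by_cases hg : gp2.1 ≠ g
    · simp only [if_pos hg]
      apply List.foldl_hom (f := fun d => cg.insert g d)
      intro d fp2
      by_cases hm : bond ∈ fp2.2
      · simp only [if_pos hm]
        exact insert_modify_self cg g d PySem.Dict.empty (fun inner => inner.insert atom [fp2.1])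
      · simp only [if_neg hm]
    · simp only [if_neg hg]

-- collapse of repeated insertions at one key: only the last value survives
theorem foldl_insert_last (atom : Int) (ms : List Int) (d : PySem.Dict Int (List Int)) :
    ms.foldl (fun d f => d.insert atom [f]) d
    = match ms.getLast? with
      | none => d
      | some f => d.insert atom [f] := by
  induction ms generalizing d with
  | nil => rfl
  | cons x xs ih =>
    simp only [List.foldl_cons, ih]
    cases h : xs.getLast? with
    | none =>
      have : xs = [] := List.getLast?_eq_none_iff.mp h
      subst this; rfl
    | some f =>
      have h2 : (x :: xs).getLast? = some f := by
        cases xs with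
        | nil => simp at h
        | cons y ys => simpa [List.getLast?_cons_cons] using h
      simp [h2, PySem.Dict.insert_insert_self]

theorem getLast?_cons_or {α : Type} (a : α) (l : List α) :
    (a :: l).getLast? = l.getLast?.or (some a) := by
  rw [show a :: l = [a] ++ l from rfl, List.getLast?_append]; rfl

-- A's fragment-level scan as a fold of insertions over the matching fragment ids
theorem A_frag (b atom : Int) (frags : List (Int × List Int)) (d : PySem.Dict Int (List Int)) :
    frags.foldl (fun d fp2 => if b ∈ fp2.2 then d.insert atom [fp2.1] else d) d
    = (frags.flatMap (fun fp2 => if b ∈ fp2.2 then [fp2.1] else [])).foldl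
        (fun d f => d.insert atom [f]) d := by
  rw [List.foldl_flatMap]
  apply List.foldl_ext
  intro d fp2 _
  by_cases hm : b ∈ fp2.2 <;> simp [hm]

-- A's nested match loop is the fold of insertions over msList
theorem A_matches (ad : List (Int × List (Int × List Int))) (g atom : Int) (bonds : List Int)
    (d : PySem.Dict Int (List Int)) :
    bonds.foldl (fun d bond =>
      ad.foldl (fun d gp2 =>
        if gp2.1 ≠ g then
          gp2.2.foldl (fun d fp2 =>
            if bond ∈ fp2.2 then d.insert atom [fp2.1] else d) d
        else d) d) d
    = (msList ad g bonds).foldl (fun d f => d.insert atom [f]) d := by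
  unfold msList
  rw [List.foldl_flatMap]
  apply List.foldl_ext
  intro d b _
  rw [List.foldl_flatMap]
  apply List.foldl_ext
  intro d gp2 _
  by_cases hg : gp2.1 = g
  · simp [hg]
  · simp only [if_neg hg, if_pos (by exact hg : gp2.1 ≠ g)]
    exact A_frag b atom gp2.2 d

-- conditional last-assignment fold = getLast? of the filtered, projected list
theorem lastFold {α : Type} (l : List α) (P : α → Prop) [DecidablePred P] (v : α → Int)
    (last0 : Option Int) :
    l.foldl (fun last q => if P q then some (v q) else last) last0
    = ((l.filter (fun q => decide (P q))).map v).getLast?.or last0 := by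
  induction l generalizing last0 with
  | nil => simp
  | cons x xs ih =>
    rw [List.foldl_cons, ih]
    by_cases h : P x
    · rw [if_pos h, List.filter_cons_of_pos (by simp [h]), List.map_cons,
        getLast?_cons_or, Option.or_assoc, Option.some_or]
    · rw [if_neg h, List.filter_cons_of_neg (by simp [h])]

theorem chainLast {β : Type} (l : List β) (M : β → List Int) (last0 : Option Int) :
    l.foldl (fun last b => ((M b).getLast?).or last) last0
    = ((l.flatMap M).getLast?).or last0 := by
  induction l generalizing last0 with
  | nil => simp
  | cons x xs ih =>
    rw [List.foldl_cons, ih, List.flatMap_cons, List.getLast?_append, Option.or_assoc]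

-- distinct elements of one fragment, filtered down to one bond
theorem filter_beq_of_nodup (l : List Int) (h : l.Nodup) (b : Int) :
    l.filter (fun a => a == b) = if b ∈ l then [b] else [] := by
  induction l with
  | nil => simp
  | cons a l ih =>
    obtain ⟨ha, hl⟩ := List.nodup_cons.mp h
    by_cases hab : a = b
    · subst hab
      rw [List.filter_cons_of_pos (by simp), ih hl, if_neg ha, if_pos (List.mem_cons_self)]
    · rw [List.filter_cons_of_neg (by simp [hab]), ih hl]
      by_cases hbl : b ∈ l <;> simp [hbl, List.mem_cons, Ne.symm hab]

theorem filter_beq_dedup (xs : List Int) (b : Int) :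
    (PySem.List.dedup xs).filter (fun a => a == b) = if b ∈ xs then [b] else [] := by
  rw [filter_beq_of_nodup _ (by simp [PySem.List.dedup, PySem.Set.nodup_ofList]) b]
  simp [PySem.List.dedup, PySem.Set.mem_ofList]

-- one group's contribution to occ, filtered down to one bond
theorem occ_frag (g b : Int) (frags : List (Int × List Int)) :
    ((frags.flatMap (fun fp => (PySem.List.dedup fp.2).map (fun a => (a, (g, fp.1))))).filter
        (fun p => p.1 == b)).map (·.2)
    = frags.flatMap (fun fp2 => if b ∈ fp2.2 then [(g, fp2.1)] else []) := by
  induction frags with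
  | nil => rfl
  | cons fp frags ih =>
    rw [List.flatMap_cons, List.flatMap_cons, List.filter_append, List.map_append, ih]
    congr 1
    rw [List.filter_map]
    have : ((fun p => p.1 == b) ∘ fun a => (a, (g, fp.1))) = fun a => a == b := rfl
    rw [this, filter_beq_dedup]
    by_cases hm : b ∈ fp.2 <;> simp [hm]

-- what B's index stores under each bond
theorem occ_getD (ad : List (Int × List (Int × List Int))) (b : Int) :
    ((ad.flatMap (fun gp => gp.2.flatMap (fun fp =>
        (PySem.List.dedup fp.2).map (fun a => (a, (gp.1, fp.1)))))).foldl
      (fun d p => d.modify p.1 [] (fun l => l ++ [p.2])) PySem.Dict.empty).getD b []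
    = occPairs ad b := by
  rw [PySem.Dict.getD_foldl_modify_append, PySem.Dict.getD_empty, List.nil_append]
  unfold occPairs
  induction ad with
  | nil => rfl
  | cons gp ad ih =>
    rw [List.flatMap_cons, List.flatMap_cons, List.filter_append, List.map_append, ih, occ_frag]

-- occ entries of one bond, those of foreign groups, projected to the fragment id
theorem occ_filter_b (ad : List (Int × List (Int × List Int))) (g b : Int) :
    (((occPairs ad b).filter (fun q => decide (q.1 ≠ g))).map (·.2))
    = ad.flatMap (fun gp2 =>
        if gp2.1 = g then [] else gp2.2.flatMap (fun fp2 => if b ∈ fp2.2 then [fp2.1] else [])) := by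
  unfold occPairs
  induction ad with
  | nil => rfl
  | cons gp ad ih =>
    rw [List.flatMap_cons, List.flatMap_cons, List.filter_append, List.map_append, ih]
    congr 1
    induction gp.2 with
    | nil => by_cases hg : gp.1 = g <;> simp [hg]
    | cons fp2 frags ih2 =>
      rw [List.flatMap_cons, List.filter_append, List.map_append, ih2]
      by_cases hm : b ∈ fp2.2 <;> by_cases hg : gp.1 = g <;> simp [hm, hg]

-- B's last computation equals the getLast? of A's match list
theorem B_last (ad : List (Int × List (Int × List Int))) (g : Int) (bonds : List Int)
    (occ : PySem.Dict Int (List (Int × Int))) (hocc : ∀ b, occ.getD b [] = occPairs ad b) :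
    bonds.foldl (fun last b =>
      (occ.getD b []).foldl (fun last q => if q.1 ≠ g then some q.2 else last) last) none
    = (msList ad g bonds).getLast? := by
  have h1 : bonds.foldl (fun last b =>
      (occ.getD b []).foldl (fun last q => if q.1 ≠ g then some q.2 else last) last) none
      = bonds.foldl (fun last b =>
          ((((occPairs ad b).filter (fun q => decide (q.1 ≠ g))).map (·.2)).getLast?).or last) none := by
    apply List.foldl_ext
    intro last b _
    rw [hocc b, lastFold]
  rw [h1, chainLast, Option.or_none]
  unfold msList
  exact congrArg List.getLast? (congrArg (List.flatMap · bonds)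
    (funext fun b => occ_filter_b ad g b))

theorem sort_connectivity_expand (ad : List (Int × List (Int × List Int))) (hb : List (Int × List Int))
    (hnd : (ad.map (·.1)).Nodup) :
    sort_connectivity ad hb
    = if ad.length ≤ 1 then []
      else ad.map (fun gp => (gp.1, (innerA ad hb gp.1 gp.2).items)) := by
  by_cases hlen : ad.length ≤ 1
  · simp only [sort_connectivity, if_pos hlen, if_neg (by omega : ¬ ad.length > 1)]
    rfl
  · simp only [sort_connectivity, if_neg hlen, if_pos (by omega : ad.length > 1)]
    have h1 : ad.foldl (fun cg gp =>
        gp.2.foldl (fun cg fp =>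
          fp.2.foldl (fun cg atom =>
            match pvLookup hb atom with
            | none => cg
            | some bonds =>
              bonds.foldl (fun cg bond =>
                ad.foldl (fun cg gp2 =>
                  if gp2.1 ≠ gp.1 then
                    gp2.2.foldl (fun cg fp2 =>
                      if bond ∈ fp2.2 then
                        cg.modify gp.1 PySem.Dict.empty (fun inner => inner.insert atom [fp2.1])
                      else cg) cg
                  else cg) cg) cg) cg) (cg.insert gp.1 PySem.Dict.empty)) PySem.Dict.empty
        = ad.foldl (fun cg gp => cg.insert gp.1 (innerA ad hb gp.1 gp.2)) PySem.Dict.empty := by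
      apply List.foldl_ext
      intro cg gp _
      exact liftA ad hb cg gp.1 PySem.Dict.empty gp.2
    rw [h1, PySem.Dict.items_foldl_insert_fresh ad (·.1) (fun gp => innerA ad hb gp.1 gp.2)
          PySem.Dict.empty (fun a _ => PySem.Dict.contains_empty _) hnd]
    rw [show (PySem.Dict.empty : PySem.Dict Int (PySem.Dict Int (List Int))).items = [] from rfl,
      List.nil_append, List.map_map]
    rfl

theorem inner_eq (ad : List (Int × List (Int × List Int))) (hb : List (Int × List Int))
    (occ : PySem.Dict Int (List (Int × Int))) (hocc : ∀ b, occ.getD b [] = occPairs ad b)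
    (g : Int) (frags : List (Int × List Int)) :
    innerA ad hb g frags
    = frags.foldl (fun cut fp =>
        fp.2.foldl (fun cut a =>
          match pvLookup hb a with
          | none => cut
          | some bonds =>
            match bonds.foldl (fun last b =>
                (occ.getD b []).foldl (fun last q => if q.1 ≠ g then some q.2 else last) last) none with
            | none => cut
            | some f => cut.insert a [f]) cut) PySem.Dict.empty := by
  unfold innerA
  apply List.foldl_ext
  intro d fp _
  apply List.foldl_ext
  intro d atom _
  cases hl : pvLookup hb atom with
  | none => rfl
  | some bonds =>
    dsimp only
    rw [A_matches, foldl_insert_last, B_last ad g bonds occ hocc]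

-- ===== VERDICT (by name: the statement is the Claim_ definition above) =====
theorem sort_connectivity_spec : Claim_equal_sort_connectivity := by
  intro ad hb _hdom hpre
  unfold Spec_sort_connectivity
  rw [sort_connectivity_expand ad hb hpre.1]
  unfold sort_connectivity_alt
  by_cases hlen : ad.length <= 1
  · rw [if_pos hlen, if_pos hlen]
  · rw [if_neg hlen, if_neg hlen]
    refine List.map_congr_left (fun gp _hgp => ?_)
    rw [inner_eq ad hb _ (fun b => occ_getD ad b) gp.1 gp.2]
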